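-- pv_equiv track=rewrite | github.com/noamkari/nand2tetris-10 | JackTokenizer.py | find_quoted_substrings
-- ===== SOURCE A (Python) =====
-- def find_quoted_substrings(s: str):
--     """"
--     to handle with comment in string s.t: "hi // this is not a comment"
--     """
--     start_index = None
--     quote_char = None
--
--     num_of_string = 0
--     dct = {}
--
--     for i, c in enumerate(s):
--         if c == '"' or c == "'":
--             if start_index is None:
--                 # start of a quoted substring
--                 start_index = i
--                 quote_char = c
--             elif quote_char == c:
--                 # end of a quoted substring
--
--                 tmp_id = f"STR{num_of_string}"
--                 dct[tmp_id] = s[start_index:i + 1]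
--
--                 num_of_string += 1
--
--                 start_index = None
--                 quote_char = None
--
--     for key, val in dct.items():
--         s = s.replace(val, key)
--
--     return s, dct
-- ===== SOURCE B (Python) =====
-- def find_quoted_substrings(s: str):
--     """Same result as the char-by-char scan, but jumps between quote
--     positions with str.find instead of visiting every character."""
--     dct = {}
--     num = 0
--     pos = 0
--     while True:
--         i1 = s.find('"', pos)
--         i2 = s.find("'", pos)
--         if i1 == -1 and i2 == -1:
--             break
--         if i2 == -1 or (i1 != -1 and i1 < i2):
--             i, q = i1, '"'
--         else:
--             i, q = i2, "'"
--         j = s.find(q, i + 1)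
--         if j == -1:
--             break
--         dct["STR" + str(num)] = s[i:j + 1]
--         num += 1
--         pos = j + 1
--     out = s
--     for key, val in dct.items():
--         out = out.replace(val, key)
--     return out, dct
-- ===== Notes on version B (the rewrite author's own statement) =====
-- stated objective: faster
-- what changed: replaces the per-character enumerate scan with three-state bookkeeping by an index-jumping loop that uses str.find to hop directly to the next quote and to its matching closer
import Mathlib
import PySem

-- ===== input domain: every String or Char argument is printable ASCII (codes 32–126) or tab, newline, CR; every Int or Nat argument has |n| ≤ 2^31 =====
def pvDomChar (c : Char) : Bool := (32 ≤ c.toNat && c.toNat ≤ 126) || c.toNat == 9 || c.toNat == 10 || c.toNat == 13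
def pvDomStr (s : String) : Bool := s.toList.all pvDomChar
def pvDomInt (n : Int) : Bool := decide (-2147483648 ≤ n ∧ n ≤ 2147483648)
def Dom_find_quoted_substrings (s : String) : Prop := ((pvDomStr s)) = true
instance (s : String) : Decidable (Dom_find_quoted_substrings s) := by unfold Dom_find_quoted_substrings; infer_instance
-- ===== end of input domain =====

-- B replaces the per-character scan with an index-jumping loop over str.find;
-- the final replace loop over the collected dict is identical in both (measured faster at large sizes).

-- ===== PORT A =====
-- one step of A's `for i, c in enumerate(s)` loop
def pvStepA (s : String)
    (st : Option Int × Option Char × Int × PySem.Dict String String)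
    (ic : Int × Char) : Option Int × Option Char × Int × PySem.Dict String String :=
  if ic.2 = '"' ∨ ic.2 = '\'' then
    match st with
    | (none, _, num, dct) => (some ic.1, some ic.2, num, dct)
    | (some si, qc, num, dct) =>
      if qc = some ic.2 then
        (none, none, num + 1,
          dct.insert ("STR" ++ PySem.Int.toStr num)
            (PySem.Str.slice s (some si) (some (ic.1 + 1))))
      else (some si, qc, num, dct)
  else st

-- `for key, val in dct.items(): s = s.replace(val, key)` (identical in A and B)
def pvReplaceAll (s : String) (items : List (String × String)) : String :=
  items.foldl (fun acc kv => PySem.Str.replace acc kv.2 kv.1) s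

def find_quoted_substrings (s : String) : String × (List (String × String)) :=
  let st := (PySem.List.enumerate s.toList).foldl (pvStepA s)
      ((none : Option Int), (none : Option Char), (0 : Int), (PySem.Dict.empty : PySem.Dict String String))
  let dct := st.2.2.2
  (pvReplaceAll s dct.items, dct.items)

-- ===== PORT B =====
-- B's `while True` loop; fuel is only a totality guard (s.length + 1 always suffices:
-- pos strictly increases and stays ≤ len, so the loop runs at most len times)
def pvLoopB (s : String) : Nat → Nat → Int → PySem.Dict String String → PySem.Dict String String
  | 0, _, _, dct => dct
  | fuel + 1, pos, num, dct =>
    let i1 := PySem.Str.findFrom s "\"" (pos : Int)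
    let i2 := PySem.Str.findFrom s "'" (pos : Int)
    if i1 = -1 ∧ i2 = -1 then dct
    else
      let iq : Int × String := if i2 = -1 ∨ (i1 ≠ -1 ∧ i1 < i2) then (i1, "\"") else (i2, "'")
      let j := PySem.Str.findFrom s iq.2 (iq.1 + 1)
      if j = -1 then dct
      else
        pvLoopB s fuel (j.toNat + 1) (num + 1)
          (dct.insert ("STR" ++ PySem.Int.toStr num)
            (PySem.Str.slice s (some iq.1) (some (j + 1))))

def find_quoted_substrings_alt (s : String) : String × (List (String × String)) :=
  let dct := pvLoopB s (s.toList.length + 1) 0 0 PySem.Dict.empty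
  (pvReplaceAll s dct.items, dct.items)

-- ===== PRECONDITION & SPEC =====
def Spec_find_quoted_substrings (s : String) (out : String × (List (String × String))) : Prop := out = find_quoted_substrings_alt s
instance (s : String) (out : String × (List (String × String))) : Decidable (Spec_find_quoted_substrings s out) := by unfold Spec_find_quoted_substrings; infer_instance

-- ===== CLAIM (what is proved, stated in full; the proofs are below) =====
def Claim_equal_find_quoted_substrings : Prop := ∀ (s : String), Dom_find_quoted_substrings s → Spec_find_quoted_substrings s (find_quoted_substrings s)


-- ===== LEMMAS AND PROOFS =====

-- A's scan restarted at position p of the enumeration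
def pvScanA (s : String) (p : Nat)
    (st : Option Int × Option Char × Int × PySem.Dict String String) :
    Option Int × Option Char × Int × PySem.Dict String String :=
  ((PySem.List.enumerate s.toList).drop p).foldl (pvStepA s) st

lemma pvScan_end (s : String) (p : Nat) (hp : s.toList.length ≤ p) (st) :
    pvScanA s p st = st := by
  unfold pvScanA
  rw [List.drop_eq_nil_of_le (by simpa [PySem.List.length_enumerate] using hp)]
  rfl

lemma pvScan_step (s : String) (p : Nat) (hp : p < s.toList.length) (st) :
    pvScanA s p st = pvScanA s (p + 1) (pvStepA s st ((p : Int), s.toList[p])) := by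
  unfold pvScanA
  rw [List.drop_eq_getElem_cons (by simpa [PySem.List.length_enumerate] using hp)]
  rw [PySem.List.getElem_enumerate]
  simp [List.foldl]

lemma pvScan_skip (s : String) (d : Nat) : ∀ (p : Nat) (st),
    p + d ≤ s.toList.length →
    (∀ m (hm : m < s.toList.length), p ≤ m → m < p + d →
        pvStepA s st ((m : Int), s.toList[m]) = st) →
    pvScanA s p st = pvScanA s (p + d) st := by
  induction d with
  | zero => intro p st _ _; rfl
  | succ d ih =>
    intro p st hle hid
    have hp : p < s.toList.length := by omega
    rw [pvScan_step s p hp st, hid p hp le_rfl (by omega),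
        ih (p+1) st (by omega) (fun m hm h1 h2 => hid m hm (by omega) (by omega))]
    ring_nf

-- step facts
lemma pvStepA_nonquote (s : String) (st) (i : Int) (c : Char)
    (h1 : c ≠ '"') (h2 : c ≠ '\'') : pvStepA s st (i, c) = st := by
  simp [pvStepA, h1, h2]

lemma pvStepA_open (s : String) (i : Int) (c : Char) (hq : c = '"' ∨ c = '\'')
    (num dct) :
    pvStepA s ((none : Option Int), (none : Option Char), num, dct) (i, c)
      = (some i, some c, num, dct) := by
  simp [pvStepA, hq]

lemma pvStepA_skip_open (s : String) (si : Int) (q : Char) (num dct) (i : Int) (c : Char)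
    (hne : c ≠ q) :
    pvStepA s (some si, some q, num, dct) (i, c) = (some si, some q, num, dct) := by
  by_cases hq : c = '"' ∨ c = '\''
  · simp [pvStepA, hq, Ne.symm hne]
  · simp [pvStepA, hq]

lemma pvStepA_close (s : String) (si : Int) (q : Char) (num dct) (i : Int)
    (hq : q = '"' ∨ q = '\'') :
    pvStepA s (some si, some q, num, dct) (i, q)
      = (none, none, num + 1,
          dct.insert ("STR" ++ PySem.Int.toStr num)
            (PySem.Str.slice s (some si) (some (i + 1)))) := by
  simp [pvStepA, hq]

-- single-character findFrom characterisation
lemma pvSingleton_prefix {q : Char} {l : List Char} : [q] <+: l ↔ l.head? = some q := by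
  cases l with
  | nil => simp
  | cons a t =>
    constructor
    · rintro ⟨r, hr⟩; simp at hr; simp [hr.1]
    · intro h; simp at h; exact ⟨t, by simp [h]⟩

lemma pvSingleton_infix {q : Char} {l : List Char} : [q] <:+: l ↔ q ∈ l := by
  constructor
  · rintro ⟨p, r, hr⟩; subst hr; simp
  · intro h
    obtain ⟨p, r, hr⟩ := List.append_of_mem h
    exact ⟨p, r, by simp [hr]⟩

lemma pvFind_neg (cs : List Char) (q : Char) (k : Nat) (hk : k ≤ cs.length) :
    PySem.Chars.findFrom cs [q] (k : Int) = -1 ↔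
      ∀ m (hm : m < cs.length), k ≤ m → cs[m] ≠ q := by
  rw [PySem.Chars.findFrom_natCast_eq_neg_one_iff cs [q] k hk, pvSingleton_infix]
  constructor
  · intro h m hm hkm he
    exact h (by rw [← he]; exact List.mem_drop_iff_getElem.mpr ⟨m - k, by omega, by congr 1; omega⟩)
  · intro h hmem
    obtain ⟨j, hj, he⟩ := List.mem_drop_iff_getElem.mp hmem
    exact h (k + j) (by omega) (by omega) (by rw [← he])

lemma pvFind_pos (cs : List Char) (q : Char) (k : Nat) (hk : k ≤ cs.length)
    (h : PySem.Chars.findFrom cs [q] (k : Int) ≠ -1) :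
    let r := (PySem.Chars.findFrom cs [q] (k : Int)).toNat
    k ≤ r ∧ r < cs.length ∧ cs[r]? = some q ∧
      (∀ m (hm : m < cs.length), k ≤ m → m < r → cs[m] ≠ q) ∧
      PySem.Chars.findFrom cs [q] (k : Int) = ((PySem.Chars.findFrom cs [q] (k : Int)).toNat : Int) := by
  obtain ⟨h1, h2, h3⟩ := PySem.Chars.findFrom_natCast_spec cs [q] k hk h
  rw [pvSingleton_prefix, List.head?_drop] at h2
  refine ⟨by omega, ?_, h2, ?_, by omega⟩
  · exact (List.getElem?_eq_some_iff.mp h2).1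
  · intro m hm hkm hmr he
    exact h3 m hkm hmr (pvSingleton_prefix.mpr (by rw [List.head?_drop, List.getElem?_eq_getElem hm, he]))

-- main loop equivalence
lemma pvBranch (s : String) (fuel pos : Nat) (num : Int) (dct : PySem.Dict String String)
    (q : Char) (hq : q = '"' ∨ q = '\'') (r : Nat)
    (hpr : pos ≤ r) (hrl : r < s.toList.length) (hcr : s.toList[r] = q)
    (hfuel : s.toList.length + 1 - pos ≤ fuel + 1)
    (hbefore : ∀ m (hm : m < s.toList.length), pos ≤ m → m < r →
        s.toList[m] ≠ '"' ∧ s.toList[m] ≠ '\'')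
    (ih : ∀ (pos : Nat) (num : Int) (dct : PySem.Dict String String),
        pos ≤ s.toList.length → s.toList.length + 1 - pos ≤ fuel →
        (pvScanA s pos ((none : Option Int), (none : Option Char), num, dct)).2.2.2
          = pvLoopB s fuel pos num dct) :
    (pvScanA s pos ((none : Option Int), (none : Option Char), num, dct)).2.2.2
      = (if PySem.Chars.findFrom s.toList [q] ((r : Int) + 1) = -1 then dct
         else pvLoopB s fuel ((PySem.Chars.findFrom s.toList [q] ((r : Int) + 1)).toNat + 1) (num + 1)
            (dct.insert ("STR" ++ PySem.Int.toStr num)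
              (PySem.Str.slice s (some (r : Int))
                (some (PySem.Chars.findFrom s.toList [q] ((r : Int) + 1) + 1))))) := by
  -- skip the quote-free stretch [pos, r)
  have hskip : pvScanA s pos ((none : Option Int), (none : Option Char), num, dct)
      = pvScanA s r ((none : Option Int), (none : Option Char), num, dct) := by
    have := pvScan_skip s (r - pos) pos ((none : Option Int), (none : Option Char), num, dct)
      (by omega)
      (fun m hm h1 h2 => pvStepA_nonquote s _ _ _ (hbefore m hm h1 (by omega)).1
        (hbefore m hm h1 (by omega)).2)
    rwa [show pos + (r - pos) = r by omega] at this
  rw [hskip, pvScan_step s r hrl, hcr, pvStepA_open s _ q hq num dct]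
  have hcast : ((r : Int) + 1) = ((r + 1 : Nat) : Int) := by push_cast; ring
  by_cases hj : PySem.Chars.findFrom s.toList [q] ((r : Int) + 1) = -1
  · rw [if_pos hj]
    -- the opener is never closed: the open state survives to the end of the string
    have hnone := (pvFind_neg s.toList q (r + 1) (by omega)).mp (by rwa [← hcast])
    have := pvScan_skip s (s.toList.length - (r + 1)) (r + 1)
      ((some (r : Int)), (some q), num, dct) (by omega)
      (fun m hm h1 h2 => pvStepA_skip_open s _ q num dct _ _ (hnone m hm h1))
    rw [show (r + 1) + (s.toList.length - (r + 1)) = s.toList.length by omega] at this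
    rw [this, pvScan_end s _ le_rfl]
  · rw [if_neg hj]
    rw [hcast] at hj ⊢
    obtain ⟨h1, h2, h3, h4, h5⟩ := pvFind_pos s.toList q (r + 1) (by omega) hj
    set rj := (PySem.Chars.findFrom s.toList [q] ((r + 1 : Nat) : Int)).toNat with hrj
    have hcq : s.toList[rj]'h2 = q := by
      have := List.getElem?_eq_some_iff.mp h3; exact this.2
    -- skip [r+1, rj): nothing there closes the open quote
    have hskip2 : pvScanA s (r + 1) ((some (r : Int)), (some q), num, dct)
        = pvScanA s rj ((some (r : Int)), (some q), num, dct) := by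
      have := pvScan_skip s (rj - (r + 1)) (r + 1) ((some (r : Int)), (some q), num, dct)
        (by omega)
        (fun m hm hm1 hm2 => pvStepA_skip_open s _ q num dct _ _ (h4 m hm hm1 (by omega)))
      rwa [show (r + 1) + (rj - (r + 1)) = rj by omega] at this
    rw [hskip2, pvScan_step s rj h2, hcq, pvStepA_close s _ q num dct _ hq]
    rw [h5]
    exact ih (rj + 1) (num + 1) _ (by omega) (by omega)

lemma pvMain (s : String) : ∀ (fuel pos : Nat) (num : Int) (dct : PySem.Dict String String),
    pos ≤ s.toList.length → s.toList.length + 1 - pos ≤ fuel →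
    (pvScanA s pos ((none : Option Int), (none : Option Char), num, dct)).2.2.2
      = pvLoopB s fuel pos num dct := by
  intro fuel
  induction fuel with
  | zero => intro pos num dct h1 h2; omega
  | succ fuel ih =>
    intro pos num dct hpos hfuel
    have ht1 : ("\"" : String).toList = ['"'] := rfl
    have ht2 : ("'" : String).toList = ['\''] := rfl
    simp only [pvLoopB, PySem.Str.findFrom_eq, ht1, ht2]
    by_cases h0 : PySem.Chars.findFrom s.toList ['"'] (pos : Int) = -1 ∧
        PySem.Chars.findFrom s.toList ['\''] (pos : Int) = -1
    · rw [if_pos h0]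
      have hd := (pvFind_neg s.toList '"' pos hpos).mp h0.1
      have hs := (pvFind_neg s.toList '\'' pos hpos).mp h0.2
      have := pvScan_skip s (s.toList.length - pos) pos
        ((none : Option Int), (none : Option Char), num, dct) (by omega)
        (fun m hm h1 h2 => pvStepA_nonquote s _ _ _ (hd m hm h1) (hs m hm h1))
      rw [show pos + (s.toList.length - pos) = s.toList.length by omega] at this
      rw [this, pvScan_end s _ le_rfl]
    · rw [if_neg h0]
      by_cases hc : PySem.Chars.findFrom s.toList ['\''] (pos : Int) = -1 ∨
          (PySem.Chars.findFrom s.toList ['"'] (pos : Int) ≠ -1 ∧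
            PySem.Chars.findFrom s.toList ['"'] (pos : Int) <
              PySem.Chars.findFrom s.toList ['\''] (pos : Int))
      · rw [if_pos hc]
        have hne : PySem.Chars.findFrom s.toList ['"'] (pos : Int) ≠ -1 := by
          rcases hc with h | h
          · exact fun hh => h0 ⟨hh, h⟩
          · exact h.1
        obtain ⟨h1, h2, h3, h4, h5⟩ := pvFind_pos s.toList '"' pos hpos hne
        set r := (PySem.Chars.findFrom s.toList ['"'] (pos : Int)).toNat with hr
        have hcq : s.toList[r]'h2 = '"' := (List.getElem?_eq_some_iff.mp h3).2
        have hbefore : ∀ m (hm : m < s.toList.length), pos ≤ m → m < r →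
            s.toList[m] ≠ '"' ∧ s.toList[m] ≠ '\'' := by
          intro m hm hm1 hm2
          refine ⟨h4 m hm hm1 hm2, ?_⟩
          rcases hc with h | h
          · exact (pvFind_neg s.toList '\'' pos hpos).mp h m hm hm1
          · have hs2 : PySem.Chars.findFrom s.toList ['\''] (pos : Int) ≠ -1 := by omega
            obtain ⟨g1, g2, g3, g4, g5⟩ := pvFind_pos s.toList '\'' pos hpos hs2
            exact g4 m hm hm1 (by omega)
        have := pvBranch s fuel pos num dct '"' (Or.inl rfl) r h1 h2 hcq hfuel hbefore ih
        dsimp only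
        simp only [ht1]
        rw [h5]
        exact this
      · rw [if_neg hc]
        push Not at hc
        obtain ⟨hne2, hc2⟩ := hc
        obtain ⟨h1, h2, h3, h4, h5⟩ := pvFind_pos s.toList '\'' pos hpos hne2
        set r := (PySem.Chars.findFrom s.toList ['\''] (pos : Int)).toNat with hr
        have hcq : s.toList[r]'h2 = '\'' := (List.getElem?_eq_some_iff.mp h3).2
        have hbefore : ∀ m (hm : m < s.toList.length), pos ≤ m → m < r →
            s.toList[m] ≠ '"' ∧ s.toList[m] ≠ '\'' := by
          intro m hm hm1 hm2
          refine ⟨?_, h4 m hm hm1 hm2⟩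
          by_cases hd : PySem.Chars.findFrom s.toList ['"'] (pos : Int) = -1
          · exact (pvFind_neg s.toList '"' pos hpos).mp hd m hm hm1
          · have hle := hc2 hd
            obtain ⟨g1, g2, g3, g4, g5⟩ := pvFind_pos s.toList '"' pos hpos hd
            exact g4 m hm hm1 (by omega)
        have := pvBranch s fuel pos num dct '\'' (Or.inr rfl) r h1 h2 hcq hfuel hbefore ih
        dsimp only
        simp only [ht2]
        rw [h5]
        exact this

-- ===== VERDICT (by name: the statement is the Claim_ definition above) =====
theorem find_quoted_substrings_spec : Claim_equal_find_quoted_substrings := by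
  intro s _
  unfold Spec_find_quoted_substrings find_quoted_substrings find_quoted_substrings_alt
  have h := pvMain s (s.toList.length + 1) 0 0 PySem.Dict.empty (by omega) (by omega)
  unfold pvScanA at h
  simp only [List.drop_zero] at h
  simp only [h]
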